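-- pv_equiv track=rewrite | github.com/KubiakJakub01/ProjectEuler | src/Problem89/Problem89.py | group_numbers
-- ===== SOURCE A (Python) =====
-- def group_numbers(int_nums):
--     grouped_nums: list = []
--     len_int_nums = list(map(len, int_nums))
--     for element in sorted(set(len_int_nums), reverse=True):
--         if element in len_int_nums:
--             last_element = len(len_int_nums) - 1 - len_int_nums[::-1].index(element)
--             grouped_nums.append(int_nums[:last_element + 1])
--             int_nums = int_nums[last_element + 1:]
--             len_int_nums = len_int_nums[last_element + 1:]
--     return grouped_nums
-- ===== SOURCE B (Python) =====
-- def group_numbers(int_nums):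
--     # Single right-to-left pass: an index ends a group exactly when its string is
--     # strictly longer than every string after it.
--     groups = []
--     cur = []
--     best = -1
--     for s in reversed(int_nums):
--         n = len(s)
--         if n > best:
--             if cur:
--                 groups.append(cur[::-1])
--             cur = []
--             best = n
--         cur.append(s)
--     if cur:
--         groups.append(cur[::-1])
--     groups.reverse()
--     return groups
-- ===== Notes on version B (the rewrite author's own statement) =====
-- stated objective: alternative
-- what changed: Replaces A's loop over the sorted distinct lengths, each iteration rescanning the reversed remainder and re-slicing both lists, by a single right-to-left pass that closes a group exactly at each strict suffix-maximum of the string lengths (no sorting, no set, no rescans).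
import Mathlib
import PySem

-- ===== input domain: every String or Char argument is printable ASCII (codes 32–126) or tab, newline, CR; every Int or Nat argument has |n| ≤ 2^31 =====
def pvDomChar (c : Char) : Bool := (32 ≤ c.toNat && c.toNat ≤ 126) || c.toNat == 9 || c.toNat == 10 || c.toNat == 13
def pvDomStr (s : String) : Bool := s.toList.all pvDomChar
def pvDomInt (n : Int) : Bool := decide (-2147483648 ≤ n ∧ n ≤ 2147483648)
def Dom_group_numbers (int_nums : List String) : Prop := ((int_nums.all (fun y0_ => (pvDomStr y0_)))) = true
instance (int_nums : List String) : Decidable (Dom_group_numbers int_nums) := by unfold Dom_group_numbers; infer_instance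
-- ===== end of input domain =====

-- B replaces A's sorted-distinct-lengths loop with reversed-list rescans by one
-- right-to-left pass closing a group at each strict suffix-maximum length (alternative
-- algorithm of similar measured cost).


-- ===== PORT A =====
-- Transliteration of A. `len_int_nums[::-1]` is `lens.reverse` (exact by
-- PySem.List.slice?_none_none_neg_one); `.index` is guarded by the membership
-- test, so `(index? …).getD 0` never takes the default on the executed branch.
def group_numbers (int_nums : List String) : List (List String) :=
  let len_int_nums : List Int := int_nums.map (fun s => PySem.Str.len s)
  let st :=
    (PySem.List.sorted (PySem.Set.ofList len_int_nums) (fun x => x) true).foldl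
      (fun (st : List (List String) × List String × List Int) element =>
        let grouped_nums := st.1
        let nums := st.2.1
        let lens := st.2.2
        if element ∈ lens then
          let last_element : Int :=
            PySem.List.len lens - 1 -
              (((PySem.List.index? lens.reverse element).getD 0 : Nat) : Int)
          (grouped_nums ++ [PySem.List.slice nums none (some (last_element + 1))],
           PySem.List.slice nums (some (last_element + 1)) none,
           PySem.List.slice lens (some (last_element + 1)) none)
        else (grouped_nums, nums, lens))
      ([], int_nums, len_int_nums)
  st.1

-- ===== PORT B =====
def group_numbers_alt (int_nums : List String) : List (List String) :=
  let st :=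
    int_nums.reverse.foldl
      (fun (st : List (List String) × List String × Int) s =>
        let groups := st.1
        let cur := st.2.1
        let best := st.2.2
        let n := PySem.Str.len s
        if best < n then
          ((if cur ≠ [] then groups ++ [cur.reverse] else groups), [s], n)
        else (groups, cur ++ [s], best))
      ([], [], -1)
  (if st.2.1 ≠ [] then st.1 ++ [st.2.1.reverse] else st.1).reverse

-- ===== PRECONDITION & SPEC =====
def Spec_group_numbers (int_nums : List String) (out : List (List String)) : Prop := out = group_numbers_alt int_nums
instance (int_nums : List String) (out : List (List String)) : Decidable (Spec_group_numbers int_nums out) := by unfold Spec_group_numbers; infer_instance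

-- ===== CLAIM (what is proved, stated in full; the proofs are below) =====
def Claim_equal_group_numbers : Prop := ∀ (int_nums : List String), Dom_group_numbers int_nums → Spec_group_numbers int_nums (group_numbers int_nums)

-- ===== LEMMAS AND PROOFS =====

-- maximum string length in a list, -1 on the empty list (as Python's running max)
def maxLen (l : List String) : Int := l.foldr (fun s m => max (PySem.Str.len s) m) (-1)

-- the common grouping both programs compute
def fgroup : List String → List (List String)
  | [] => []
  | x :: t =>
    if maxLen t < PySem.Str.len x then [x] :: fgroup t
    else
      match fgroup t with
      | [] => [[x]]
      | g :: gs => (x :: g) :: gs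

lemma strLen_nonneg (s : String) : 0 ≤ PySem.Str.len s := by
  simp [PySem.Str.len_eq]

lemma maxLen_nil : maxLen [] = -1 := rfl

lemma maxLen_cons (x : String) (t : List String) :
    maxLen (x :: t) = max (PySem.Str.len x) (maxLen t) := rfl

lemma le_maxLen {l : List String} {s : String} (h : s ∈ l) :
    PySem.Str.len s ≤ maxLen l := by
  induction l with
  | nil => cases h
  | cons y t ih =>
    rw [maxLen_cons]
    rcases List.mem_cons.1 h with rfl | h'
    · exact le_max_left _ _
    · exact le_trans (ih h') (le_max_right _ _)

lemma maxLen_attained {l : List String} (h : l ≠ []) :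
    ∃ k, ∃ hk : k < l.length, PySem.Str.len l[k] = maxLen l := by
  induction l with
  | nil => exact absurd rfl h
  | cons x t ih =>
    rcases eq_or_ne t [] with rfl | ht
    · refine ⟨0, by simp, ?_⟩
      simp only [List.getElem_cons_zero, maxLen_cons, maxLen_nil]
      exact (max_eq_left (le_trans (by norm_num) (strLen_nonneg x))).symm
    · rcases ih ht with ⟨k, hk, hke⟩
      by_cases hx : maxLen t ≤ PySem.Str.len x
      · refine ⟨0, by simp, ?_⟩
        simp only [List.getElem_cons_zero, maxLen_cons]
        exact (max_eq_left hx).symm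
      · refine ⟨k + 1, by simpa using Nat.succ_lt_succ hk, ?_⟩
        simp only [List.getElem_cons_succ, maxLen_cons, hke]
        exact (max_eq_right (le_of_not_ge hx)).symm

lemma nil_not_mem_fgroup (l : List String) : [] ∉ fgroup l := by
  induction l with
  | nil => simp [fgroup]
  | cons x t ih =>
    unfold fgroup
    split
    · intro h
      rcases List.mem_cons.1 h with h | h
      · cases h
      · exact ih h
    · split
      · simp
      · next g gs heq =>
        intro h
        rcases List.mem_cons.1 h with h | h
        · cases h
        · exact ih (heq ▸ List.mem_cons_of_mem g h)

-- splitting characterisation of fgroup: cut after the LAST index holding the maximum length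
lemma fgroup_split (l : List String) (p : Nat) (hp : p < l.length)
    (hmax : PySem.Str.len l[p] = maxLen l)
    (hafter : ∀ i, ∀ hi : i < l.length, p < i → PySem.Str.len l[i] ≠ maxLen l) :
    fgroup l = l.take (p + 1) :: fgroup (l.drop (p + 1)) := by
  induction l generalizing p with
  | nil => simp at hp
  | cons x t ih =>
    cases p with
    | zero =>
      have hx : PySem.Str.len x = maxLen (x :: t) := by simpa using hmax
      have hlt : maxLen t < PySem.Str.len x := by
        rcases eq_or_ne t [] with rfl | ht
        · calc maxLen [] = -1 := maxLen_nil
            _ < 0 := by norm_num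
            _ ≤ _ := strLen_nonneg x
        · rcases maxLen_attained ht with ⟨k, hk, hke⟩
          have hne : maxLen t ≠ maxLen (x :: t) := by
            intro he
            refine hafter (k + 1) (by simpa using Nat.succ_lt_succ hk) (Nat.succ_pos k) ?_
            simp only [List.getElem_cons_succ]
            rw [hke, he]
          have hle : maxLen t ≤ maxLen (x :: t) := by simp [maxLen_cons]
          have : maxLen t < maxLen (x :: t) := lt_of_le_of_ne hle hne
          omega
      have hfg : fgroup (x :: t) = [x] :: fgroup t := by
        conv_lhs => unfold fgroup
        rw [if_pos hlt]
      rw [hfg]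
      simp
    | succ q =>
      have hq : q < t.length := by simpa using hp
      have hmx : maxLen t = maxLen (x :: t) := by
        have h1 : maxLen t ≤ maxLen (x :: t) := by simp [maxLen_cons]
        have h2 : maxLen (x :: t) ≤ maxLen t := by
          rw [← hmax]
          have : (x :: t)[q + 1] = t[q] := by simp
          rw [this]
          exact le_maxLen (List.getElem_mem hq)
        omega
      have hnot : ¬ maxLen t < PySem.Str.len x := by
        have : PySem.Str.len x ≤ maxLen (x :: t) := by simp [maxLen_cons]
        omega
      have ihv := ih q hq (by rw [hmx]; simpa using hmax)
        (fun i hi hqi => by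
          have := hafter (i + 1) (by simpa using Nat.succ_lt_succ hi) (by omega)
          rw [hmx]
          simpa using this)
      show fgroup (x :: t) = (x :: t.take (q + 1)) :: fgroup (t.drop (q + 1))
      conv_lhs => unfold fgroup
      rw [if_neg hnot, ihv]

-- ===== B-side =====

lemma alt_fold (l : List String) (h : l ≠ []) :
    ∃ g gs, fgroup l = g :: gs ∧
      l.reverse.foldl
        (fun (st : List (List String) × List String × Int) s =>
          let groups := st.1
          let cur := st.2.1
          let best := st.2.2
          let n := PySem.Str.len s
          if best < n then
            ((if cur ≠ [] then groups ++ [cur.reverse] else groups), [s], n)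
          else (groups, cur ++ [s], best))
        ([], [], -1)
      = (gs.reverse, g.reverse, maxLen l) := by
  induction l with
  | nil => exact absurd rfl h
  | cons x t ih =>
    rcases eq_or_ne t [] with rfl | ht
    · refine ⟨[x], [], ?_, ?_⟩
      · conv_lhs => unfold fgroup
        rw [if_pos (show maxLen [] < PySem.Str.len x from
          lt_of_lt_of_le (show (-1 : Int) < 0 by norm_num) (strLen_nonneg x))]
        rfl
      · have hm : maxLen [x] = PySem.Str.len x := by
          rw [maxLen_cons, maxLen_nil]
          exact max_eq_left (le_trans (by norm_num) (strLen_nonneg x))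
        have h0 : (-1 : Int) < (x.length : Int) := by omega
        rw [hm]
        simp [h0]
    · rcases ih ht with ⟨g, gs, hfg, hfold⟩
      have hg : g ≠ [] := by
        intro hge
        exact nil_not_mem_fgroup t (hfg ▸ (hge ▸ List.mem_cons_self))
      rw [List.reverse_cons, List.foldl_append, hfold]
      by_cases hlt : maxLen t < PySem.Str.len x
      · refine ⟨[x], g :: gs, ?_, ?_⟩
        · conv_lhs => unfold fgroup
          rw [if_pos hlt, hfg]
        · have hm : maxLen (x :: t) = PySem.Str.len x := by
            rw [maxLen_cons]; exact max_eq_left (le_of_lt hlt)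
          rw [hm]
          simp only [List.foldl_cons, List.foldl_nil]
          rw [if_pos hlt, if_pos (by simpa using hg)]
          simp
      · refine ⟨x :: g, gs, ?_, ?_⟩
        · conv_lhs => unfold fgroup
          rw [if_neg hlt, hfg]
        · have hm : maxLen (x :: t) = maxLen t := by
            rw [maxLen_cons]; exact max_eq_right (le_of_not_gt hlt)
          rw [hm]
          simp only [List.foldl_cons, List.foldl_nil]
          rw [if_neg hlt]
          simp

lemma alt_eq_fgroup (l : List String) : group_numbers_alt l = fgroup l := by
  rcases eq_or_ne l [] with rfl | h
  · rfl
  · rcases alt_fold l h with ⟨g, gs, hfg, hfold⟩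
    have hg : g ≠ [] := by
      intro hge
      exact nil_not_mem_fgroup l (hfg ▸ (hge ▸ List.mem_cons_self))
    unfold group_numbers_alt
    rw [hfold]
    simp only []
    rw [if_pos (by simpa using hg)]
    simp [hfg]

-- ===== A-side =====

-- A's loop, over any strictly descending list containing all remaining lengths
lemma a_fold (D : List Int) : ∀ (l : List String) (acc : List (List String)),
    D.Pairwise (fun a b => b < a) →
    (∀ e ∈ l.map (fun s => PySem.Str.len s), e ∈ D) →
    D.foldl
      (fun (st : List (List String) × List String × List Int) element =>
        let grouped_nums := st.1
        let nums := st.2.1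
        let lens := st.2.2
        if element ∈ lens then
          let last_element : Int :=
            PySem.List.len lens - 1 -
              (((PySem.List.index? lens.reverse element).getD 0 : Nat) : Int)
          (grouped_nums ++ [PySem.List.slice nums none (some (last_element + 1))],
           PySem.List.slice nums (some (last_element + 1)) none,
           PySem.List.slice lens (some (last_element + 1)) none)
        else (grouped_nums, nums, lens))
      (acc, l, l.map (fun s => PySem.Str.len s))
    = (acc ++ fgroup l, [], []) := by
  induction D with
  | nil =>
    intro l acc _ hsub
    have hl : l = [] := by
      cases l with
      | nil => rfl
      | cons x t =>
        have hx : PySem.Str.len x ∈ (x :: t).map (fun s => PySem.Str.len s) :=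
          List.mem_map_of_mem List.mem_cons_self
        have := hsub _ hx
        simp at this
    subst hl
    simp [fgroup]
  | cons d D' ih =>
    intro l acc hpair hsub
    have hpair' : D'.Pairwise (fun a b => b < a) := hpair.of_cons
    have hdgt : ∀ e ∈ D', e < d := fun e he => List.rel_of_pairwise_cons hpair he
    simp only [List.foldl_cons]
    by_cases hd : d ∈ l.map (fun s => PySem.Str.len s)
    · -- d is the maximum remaining length; cut at its last occurrence
      rw [if_pos hd]
      have hl : l ≠ [] := by rintro rfl; simp at hd
      have hle : ∀ e ∈ l.map (fun s => PySem.Str.len s), e ≤ d := by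
        intro e he
        rcases List.mem_cons.1 (hsub e he) with h | h
        · omega
        · exact le_of_lt (hdgt e h)
      have hdmax : d = maxLen l := by
        rcases maxLen_attained hl with ⟨k, hk, hke⟩
        have h1 : maxLen l ≤ d := by
          rw [← hke]
          exact hle _ (by exact List.mem_map_of_mem (List.getElem_mem hk))
        have h2 : d ≤ maxLen l := by
          rcases List.mem_map.1 hd with ⟨s, hs, hsl⟩
          rw [← hsl]; exact le_maxLen hs
        omega
      set lens := l.map (fun s => PySem.Str.len s) with hlens
      have hlen : lens.length = l.length := by simp [hlens]
      have hdrev : d ∈ lens.reverse := by simpa using hd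
      rcases Option.isSome_iff_exists.1 ((PySem.List.index?_isSome_iff _ _).2 hdrev) with ⟨j, hj⟩
      rcases PySem.List.getElem_of_index?_eq_some hj with ⟨hjlt, hjv, hjmin⟩
      have hjlen : j < l.length := by rw [← hlen]; simpa using hjlt
      set p : Nat := l.length - 1 - j with hp
      have hple : p < l.length := by omega
      have hplen : p < lens.length := by omega
      have hcast : PySem.List.len lens - 1 - ((j : Nat) : Int) + 1 = ((p + 1 : Nat) : Int) := by
        simp only [PySem.List.len_eq, hlens, List.length_map]
        push_cast
        omega
      have hidx : lens.length - 1 - j = p := by omega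
      have hlensp : lens[p]'hplen = d := by
        have h1 := hjv
        rw [List.getElem_reverse] at h1
        rw [← h1]
        congr 1
        omega
      have hafter : ∀ i, ∀ hi : i < lens.length, p < i → lens[i] ≠ d := by
        intro i hi hpi
        have hrev : lens[i] = lens.reverse[lens.length - 1 - i]'(by simp; omega) := by
          rw [List.getElem_reverse]
          congr 1
          omega
        rw [hrev]
        apply hjmin
        omega
      -- the three slices
      rw [hj]
      simp only [Option.getD_some]
      rw [hcast, PySem.List.slice_to_natCast, PySem.List.slice_from_natCast,
          PySem.List.slice_from_natCast]
      have hlensdrop : lens.drop (p + 1) = (l.drop (p + 1)).map (fun s => PySem.Str.len s) := by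
        simp [hlens, List.map_drop]
      rw [hlensdrop]
      have hsub' : ∀ e ∈ (l.drop (p + 1)).map (fun s => PySem.Str.len s), e ∈ D' := by
        intro e he
        rcases List.mem_map.1 he with ⟨s, hs, hsl⟩
        have hmem : e ∈ lens := by
          rw [hlens, ← hsl]
          exact List.mem_map_of_mem (List.mem_of_mem_drop hs)
        have hne : e ≠ d := by
          rcases List.mem_iff_getElem.1 hs with ⟨k, hk, hkv⟩
          have hk' : p + 1 + k < l.length := by
            have := hk; simp at this; omega
          have : e = lens[p + 1 + k]'(by omega) := by
            rw [← hsl, ← hkv]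
            simp only [hlens, List.getElem_map, List.getElem_drop]
          rw [this]
          exact hafter _ (by omega) (by omega)
        rcases List.mem_cons.1 (hsub e hmem) with h | h
        · exact absurd h hne
        · exact h
      rw [ih (l.drop (p + 1)) (acc ++ [l.take (p + 1)]) hpair' hsub']
      have hsplit : fgroup l = l.take (p + 1) :: fgroup (l.drop (p + 1)) := by
        apply fgroup_split l p hple
        · rw [← hdmax]
          have : lens[p]'(by omega) = PySem.Str.len (l[p]'hple) := by
            simp [hlens]
          rw [← this, hlensp]
        · intro i hi hpi
          rw [← hdmax]
          have : lens[i]'(by omega) = PySem.Str.len (l[i]'hi) := by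
            simp [hlens]
          rw [← this]
          exact hafter i (by omega) hpi
      rw [hsplit]
      simp
    · rw [if_neg hd]
      exact ih l acc hpair' (fun e he => by
        rcases List.mem_cons.1 (hsub e he) with h | h
        · exact absurd (h ▸ he) hd
        · exact h)

lemma a_eq_fgroup (l : List String) : group_numbers l = fgroup l := by
  unfold group_numbers
  set lens := l.map (fun s => PySem.Str.len s) with hlens
  set D := PySem.List.sorted (PySem.Set.ofList lens) (fun x => x) true with hD
  have hnodup : D.Nodup :=
    ((PySem.List.sorted_perm (PySem.Set.ofList lens) (fun x => x) true).nodup_iff).2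
      (PySem.Set.nodup_ofList lens)
  have hsorted : D.Pairwise (fun a b : Int => b ≤ a) :=
    PySem.List.sorted_pairwise_rev (PySem.Set.ofList lens) (fun x => x)
  have hpair : D.Pairwise (fun a b : Int => b < a) := by
    have := hsorted.and hnodup
    exact this.imp (fun {a b} h => lt_of_le_of_ne h.1 (Ne.symm h.2))
  have hsub : ∀ e ∈ lens, e ∈ D := by
    intro e he
    rw [hD, PySem.List.mem_sorted]
    exact (PySem.Set.mem_ofList _ _).2 he
  have := a_fold D l [] hpair hsub
  simp only [← hlens, ← hD] at *
  rw [this]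
  simp

-- ===== VERDICT (by name: the statement is the Claim_ definition above) =====
theorem group_numbers_spec : Claim_equal_group_numbers := by
  intro l _
  unfold Spec_group_numbers
  rw [a_eq_fgroup, alt_eq_fgroup]
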